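-- pv_equiv track=rewrite | github.com/haj0136/AKS | cv1-entropy/__init__.py | get_manhatton
-- ===== SOURCE A (Python) =====
-- def get_manhatton(dict1: dict, dict2: dict):
--     unique_chars = set(dict1.keys()).union(set(dict2.keys()))
--
--     result = 0
--     for symb in unique_chars:
--         x = 0
--         y = 0
--         if symb in dict1:
--             x = dict1[symb]
--         else:
--             x = 0
--         if symb in dict2:
--             y = dict2[symb]
--         else:
--             y = 0
--
--         result = result + abs(x-y)
--     return result
-- ===== SOURCE B (Python) =====
-- def get_manhatton(dict1: dict, dict2: dict):
--     rest = dict(dict2)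
--     total = 0
--     for symb, x in dict1.items():
--         total += abs(x - rest.pop(symb, 0))
--     for y in rest.values():
--         total += abs(y)
--     return total
-- ===== Notes on version B (the rewrite author's own statement) =====
-- stated objective: alternative
-- what changed: Replaces the union-of-key-sets loop with per-key membership branches by a single pass over dict1 that pops matches out of a copy of dict2, then sums the absolute values left in the copy; no key sets are built.
import Mathlib
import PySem

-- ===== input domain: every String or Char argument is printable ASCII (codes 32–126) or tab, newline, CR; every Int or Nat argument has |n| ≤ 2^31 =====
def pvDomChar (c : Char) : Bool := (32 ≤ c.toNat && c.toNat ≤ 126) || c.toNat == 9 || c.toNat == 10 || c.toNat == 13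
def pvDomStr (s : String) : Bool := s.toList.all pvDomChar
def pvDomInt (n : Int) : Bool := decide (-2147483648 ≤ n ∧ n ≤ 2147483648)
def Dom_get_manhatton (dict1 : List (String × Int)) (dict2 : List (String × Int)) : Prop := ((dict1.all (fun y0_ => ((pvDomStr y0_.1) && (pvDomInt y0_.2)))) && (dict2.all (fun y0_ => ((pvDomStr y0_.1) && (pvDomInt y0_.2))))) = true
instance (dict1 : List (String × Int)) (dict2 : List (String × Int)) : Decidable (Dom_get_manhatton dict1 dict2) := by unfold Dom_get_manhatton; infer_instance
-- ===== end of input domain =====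

-- B replaces A's union-of-key-sets loop by one pass over dict1 popping from a copy of dict2 plus a sum over the leftovers (alternative decomposition, same cost).


-- ===== PORT A =====
-- unique_chars = set(dict1.keys()) | set(dict2.keys()); sum of abs(x-y) over it
-- (a sum is independent of the set's iteration order, so folding over the Set's list is exact)
def get_manhatton (dict1 : List (String × Int)) (dict2 : List (String × Int)) : Int :=
  let d1 : PySem.Dict String Int := PySem.Dict.ofList dict1
  let d2 : PySem.Dict String Int := PySem.Dict.ofList dict2
  let unique_chars : PySem.Set String :=
    PySem.Set.union (PySem.Set.ofList d1.keys) (PySem.Set.ofList d2.keys)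
  unique_chars.foldl (fun result symb =>
    let x : Int := if d1.contains symb then d1.getD symb 0 else 0
    let y : Int := if d2.contains symb then d2.getD symb 0 else 0
    result + |x - y|) 0

-- ===== PORT B =====
-- rest = dict(dict2); one pass over dict1 popping from rest; then sum |v| over rest's values
def get_manhatton_alt (dict1 : List (String × Int)) (dict2 : List (String × Int)) : Int :=
  let d1 : PySem.Dict String Int := PySem.Dict.ofList dict1
  let d2 : PySem.Dict String Int := PySem.Dict.ofList dict2
  let st := d1.items.foldl (fun (st : Int × PySem.Dict String Int) p =>
      match st.2.pop? p.1 with                 -- rest.pop(symb, 0)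
      | some (v, rest) => (st.1 + |p.2 - v|, rest)
      | none => (st.1 + |p.2 - 0|, st.2)) (0, d2)
  st.2.values.foldl (fun total y => total + |y|) st.1

-- ===== PRECONDITION & SPEC =====
def Spec_get_manhatton (dict1 : List (String × Int)) (dict2 : List (String × Int)) (out : Int) : Prop := out = get_manhatton_alt dict1 dict2
instance (dict1 : List (String × Int)) (dict2 : List (String × Int)) (out : Int) : Decidable (Spec_get_manhatton dict1 dict2 out) := by unfold Spec_get_manhatton; infer_instance

-- ===== CLAIM (what is proved, stated in full; the proofs are below) =====
def Claim_equal_get_manhatton : Prop := ∀ (dict1 : List (String × Int)) (dict2 : List (String × Int)), Dom_get_manhatton dict1 dict2 → Spec_get_manhatton dict1 dict2 (get_manhatton dict1 dict2)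

-- ===== LEMMAS AND PROOFS =====

-- getD is unchanged by erasing a different key
theorem pv_getD_erase_of_ne (d : PySem.Dict String Int) (k k' : String) (v : Int)
    (h : k' ≠ k) : (d.erase k).getD k' v = d.getD k' v := by
  simp only [PySem.Dict.erase, PySem.Dict.getD, PySem.Dict.get?]
  induction d.items with
  | nil => rfl
  | cons p t ih =>
      rw [List.filter_cons]
      by_cases hpk : p.1 = k
      · have h1 : (p.1 == k') = false := by
          simp only [beq_eq_false_iff_ne, ne_eq, hpk]
          exact fun e => h e.symm
        have h2 : (p.1 == k) = true := by simp [hpk]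
        simp only [h2, Bool.not_true, Bool.false_eq_true, if_false, List.find?_cons, h1]
        exact ih
      · have h2 : (p.1 == k) = false := by simp [hpk]
        simp only [h2, Bool.not_false, if_true, List.find?_cons]
        cases hpk' : (p.1 == k')
        · exact ih
        · rfl

-- erasing an absent key is the identity
theorem pv_erase_of_not_contains (d : PySem.Dict String Int) (k : String)
    (h : d.contains k = false) : d.erase k = d := by
  apply PySem.Dict.ext
  show d.items.filter _ = d.items
  apply List.filter_eq_self.mpr
  intro p hp
  rw [Bool.not_eq_eq_eq_not, Bool.not_true, beq_eq_false_iff_ne]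
  intro hpk
  have hk : k ∈ d.keys := by
    simp only [PySem.Dict.keys]
    exact List.mem_map.mpr ⟨p, hp, hpk⟩
  rw [PySem.Dict.contains_eq_decide_mem_keys] at h
  simp [hk] at h

-- the step of B's first loop, uniformly
theorem pv_step_eq (d : PySem.Dict String Int) (t : Int) (p : String × Int) :
    (match d.pop? p.1 with
      | some (v, rest) => (t + |p.2 - v|, rest)
      | none => (t + |p.2 - 0|, d)) = (t + |p.2 - d.getD p.1 0|, d.erase p.1) := by
  simp only [PySem.Dict.pop?]
  cases hg : d.get? p.1 with
  | none =>
      have hc : d.contains p.1 = false := by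
        rw [PySem.Dict.contains_eq_isSome_get?, hg]; rfl
      simp [PySem.Dict.getD_of_get?_eq_none d 0 hg, pv_erase_of_not_contains d p.1 hc]
  | some v => simp [PySem.Dict.getD_of_get?_eq_some d 0 hg]

-- B's first loop, computed relative to the initial dictionary
theorem pv_bfold (l : List (String × Int)) (d : PySem.Dict String Int) (t : Int)
    (hl : (l.map Prod.fst).Nodup) :
    l.foldl (fun (st : Int × PySem.Dict String Int) p =>
        (st.1 + |p.2 - st.2.getD p.1 0|, st.2.erase p.1)) (t, d)
    = (t + (l.map (fun p => |p.2 - d.getD p.1 0|)).sum,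
       l.foldl (fun d p => d.erase p.1) d) := by
  induction l generalizing d t with
  | nil => simp
  | cons p rest ih =>
      simp only [List.map_cons, List.nodup_cons] at hl
      simp only [List.foldl_cons]
      rw [ih _ _ hl.2]
      have hmap : (rest.map (fun q => |q.2 - (d.erase p.1).getD q.1 0|))
           = (rest.map (fun q => |q.2 - d.getD q.1 0|)) := by
        apply List.map_congr_left
        intro q hq
        rw [pv_getD_erase_of_ne]
        intro he
        exact hl.1 (he ▸ List.mem_map_of_mem hq)
      rw [hmap, List.map_cons, List.sum_cons]
      exact Prod.ext (by ring) rfl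

-- items after erasing every key of l
theorem pv_erase_fold_items (l : List (String × Int)) (d : PySem.Dict String Int) :
    (l.foldl (fun d p => d.erase p.1) d).items
    = d.items.filter (fun q => !(l.map Prod.fst).any (fun k => q.1 == k)) := by
  induction l generalizing d with
  | nil => simp
  | cons p rest ih =>
      simp only [List.foldl_cons, ih]
      show (d.items.filter _).filter _ = _
      rw [List.filter_filter]
      apply List.filter_congr
      intro q _
      simp only [List.map_cons, List.any_cons]
      cases hq1 : (q.1 == p.1) <;> simp

-- ===== VERDICT (by name: the statement is the Claim_ definition above) =====
theorem get_manhatton_spec : Claim_equal_get_manhatton := by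
  intro dict1 dict2 _
  unfold Spec_get_manhatton get_manhatton get_manhatton_alt
  have hstep : (fun (st : Int × PySem.Dict String Int) (p : String × Int) =>
      match st.2.pop? p.1 with
      | some (v, rest) => (st.1 + |p.2 - v|, rest)
      | none => (st.1 + |p.2 - 0|, st.2))
    = (fun (st : Int × PySem.Dict String Int) p =>
        (st.1 + |p.2 - st.2.getD p.1 0|, st.2.erase p.1)) :=
    funext fun st => funext fun p => pv_step_eq st.2 st.1 p
  simp only [hstep]
  have h1 : (PySem.Dict.ofList dict1).keys.Nodup := PySem.Dict.nodup_keys_ofList dict1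
  have h2 : (PySem.Dict.ofList dict2).keys.Nodup := PySem.Dict.nodup_keys_ofList dict2
  rw [pv_bfold _ _ _ h1, PySem.List.foldl_add, PySem.List.foldl_add]
  have hif : (fun symb =>
      |(if (PySem.Dict.ofList dict1).contains symb = true then (PySem.Dict.ofList dict1).getD symb 0 else 0) -
        if (PySem.Dict.ofList dict2).contains symb = true then (PySem.Dict.ofList dict2).getD symb 0 else 0|)
      = fun k => |(PySem.Dict.ofList dict1).getD k 0 - (PySem.Dict.ofList dict2).getD k 0| := by
    funext k
    by_cases hc1 : (PySem.Dict.ofList dict1).contains k = true <;>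
      by_cases hc2 : (PySem.Dict.ofList dict2).contains k = true
    · simp [hc1, hc2]
    · rw [PySem.Dict.getD_of_not_contains (PySem.Dict.ofList dict2) 0 (Bool.not_eq_true _ ▸ hc2)]
      simp [hc1, hc2]
    · rw [PySem.Dict.getD_of_not_contains (PySem.Dict.ofList dict1) 0 (Bool.not_eq_true _ ▸ hc1)]
      simp [hc1, hc2]
    · rw [PySem.Dict.getD_of_not_contains (PySem.Dict.ofList dict1) 0 (Bool.not_eq_true _ ▸ hc1),
          PySem.Dict.getD_of_not_contains (PySem.Dict.ofList dict2) 0 (Bool.not_eq_true _ ▸ hc2)]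
      simp [hc1, hc2]
  rw [hif]
  have hU : (PySem.Set.ofList (PySem.Dict.ofList dict1).keys).union
        (PySem.Set.ofList (PySem.Dict.ofList dict2).keys)
      = (PySem.Dict.ofList dict1).keys ++
        (PySem.Dict.ofList dict2).keys.filter
          (fun y => !(PySem.Set.contains (PySem.Dict.ofList dict1).keys y)) := by
    show PySem.Set.update _ _ = _
    rw [PySem.Set.ofList_eq_self_of_nodup _ h1, PySem.Set.update_eq_append_filter,
        PySem.Set.ofList_ofList, PySem.Set.ofList_eq_self_of_nodup _ h2]
  rw [hU, List.map_append, List.sum_append]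
  have e1 : (List.map (fun p => |p.2 - (PySem.Dict.ofList dict2).getD p.1 0|)
        (PySem.Dict.ofList dict1).items).sum
      = (List.map (fun k => |(PySem.Dict.ofList dict1).getD k 0 - (PySem.Dict.ofList dict2).getD k 0|)
        (PySem.Dict.ofList dict1).keys).sum := by
    rw [PySem.Dict.items_eq_map_keys _ h1 0, List.map_map]
    rfl
  have hR : (List.foldl (fun d p => d.erase p.1) (PySem.Dict.ofList dict2)
        (PySem.Dict.ofList dict1).items).values
      = ((PySem.Dict.ofList dict2).items.filter
          (fun q => !((PySem.Dict.ofList dict1).items.map Prod.fst).any (fun k => q.1 == k))).map Prod.snd := by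
    show (List.foldl (fun d p => d.erase p.1) (PySem.Dict.ofList dict2)
        (PySem.Dict.ofList dict1).items).items.map Prod.snd = _
    rw [pv_erase_fold_items]
  have e2 : (List.map abs (List.foldl (fun d p => d.erase p.1) (PySem.Dict.ofList dict2)
        (PySem.Dict.ofList dict1).items).values).sum
      = (List.map (fun k => |(PySem.Dict.ofList dict1).getD k 0 - (PySem.Dict.ofList dict2).getD k 0|)
        (List.filter (fun y => !PySem.Set.contains (PySem.Dict.ofList dict1).keys y)
          (PySem.Dict.ofList dict2).keys)).sum := by
    rw [hR, List.map_map, PySem.Dict.items_eq_map_keys _ h2 0, List.filter_map, List.map_map]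
    have hpq : ((fun q => !((PySem.Dict.ofList dict1).items.map Prod.fst).any (fun k => q.1 == k)) ∘
          (fun k => (k, (PySem.Dict.ofList dict2).getD k 0)))
        = (fun y => !PySem.Set.contains (PySem.Dict.ofList dict1).keys y) := by
      funext k
      simp only [Function.comp_apply, PySem.Set.contains, PySem.Dict.keys]
      congr 1
      rw [List.contains_eq_any_beq, List.any_map]
    rw [hpq]
    apply congrArg
    apply List.map_congr_left
    intro k hk
    have hkQ := (List.mem_filter.mp hk).2
    have hknot : k ∉ (PySem.Dict.ofList dict1).keys := by
      intro hmem
      rw [(PySem.Set.contains_iff _ _).mpr hmem] at hkQ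
      simp at hkQ
    have hcf : (PySem.Dict.ofList dict1).contains k = false := by
      rw [PySem.Dict.contains_eq_decide_mem_keys]
      simp [hknot]
    rw [Function.comp_apply, PySem.Dict.getD_of_not_contains _ 0 hcf]
    simp
  rw [e1, e2]
  ring
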